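-- pv_equiv track=rewrite | github.com/hojelse/thesis | code/misc/branch_width_brute_force.py | leafs_of
-- ===== SOURCE A (Python) =====
-- def leafs_of(T, s, x):
-- 	seen = set([x])
-- 	leafs = []
-- 	stack = [s]
-- 	while stack:
-- 		v = stack.pop()
-- 		if v in seen:
-- 			continue
-- 		seen.add(v)
-- 		if "internal" not in v:
-- 			leafs.extend(list(v))
-- 		stack.extend(T[v])
-- 	return leafs
-- ===== SOURCE B (Python) =====
-- def leafs_of(T, s, x):
--     seen = {x}
--     leafs = []
--     def visit(v):
--         if v in seen:
--             return
--         seen.add(v)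
--         if "internal" not in v:
--             leafs.extend(v)
--         for w in reversed(T[v]):
--             visit(w)
--     visit(s)
--     return leafs
-- ===== Notes on version B (the rewrite author's own statement) =====
-- stated objective: alternative
-- what changed: The explicit-stack while-loop DFS (visited check at pop time, children pushed then popped last-first) is replaced by a recursive visitor that checks seen on entry, emits, and recurses over reversed(T[v]); no stack list is maintained.
import Mathlib
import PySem

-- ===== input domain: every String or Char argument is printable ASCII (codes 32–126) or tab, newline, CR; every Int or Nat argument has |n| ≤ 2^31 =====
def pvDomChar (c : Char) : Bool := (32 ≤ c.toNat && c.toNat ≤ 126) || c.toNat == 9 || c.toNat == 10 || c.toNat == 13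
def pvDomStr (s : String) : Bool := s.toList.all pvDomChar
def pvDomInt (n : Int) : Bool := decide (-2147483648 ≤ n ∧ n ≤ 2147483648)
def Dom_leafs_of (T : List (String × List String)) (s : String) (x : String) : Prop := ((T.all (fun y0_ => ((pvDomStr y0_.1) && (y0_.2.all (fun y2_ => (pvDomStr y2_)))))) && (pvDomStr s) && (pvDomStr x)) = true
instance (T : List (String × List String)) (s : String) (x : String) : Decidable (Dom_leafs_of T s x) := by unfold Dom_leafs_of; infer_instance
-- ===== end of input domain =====

-- B replaces A's explicit-stack DFS (visited check at pop time) by a recursive visitor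
-- (visited check at entry, children in reversed order); return values agree, no speed claim.

-- shared tiny helpers: what both Pythons write inline
-- 'T[v]' looked up as first match; total via default [] (outside Pre_ only)
def pvChilds (T : List (String × List String)) (v : String) : List String :=
  (PySem.Dict.mk T).getD v []

-- 'if "internal" not in v: leafs.extend(list(v))' — the strings appended for one node
def pvEmit (v : String) : List String :=
  if PySem.Str.isIn "internal" v then [] else v.toList.map String.singleton

-- number of keys of T not yet seen (termination measure for A's while loop)
def pvUnseen (T : List (String × List String)) (seen : PySem.Set String) : Nat :=
  ((T.map Prod.fst).filter (fun k => !(PySem.Set.contains seen k))).length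

theorem pvContains_add (seen : PySem.Set String) (v k : String) :
    (PySem.Set.add seen v).contains k = (seen.contains k || k == v) := by
  have h1 : (PySem.Set.add seen v).contains k = true ↔ k ∈ seen ∨ k = v := by
    rw [PySem.Set.contains_iff, PySem.Set.mem_add]
  have h2 : seen.contains k = true ↔ k ∈ seen := PySem.Set.contains_iff seen k
  cases hc : (PySem.Set.add seen v).contains k <;>
    cases hs : seen.contains k <;> simp_all

theorem pvFilter_len_le {α : Type} (p q : α → Bool)
    (h : ∀ a, q a = true → p a = true) :
    ∀ l : List α, (l.filter q).length ≤ (l.filter p).length := by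
  intro l
  induction l with
  | nil => simp
  | cons a l ih =>
    simp only [List.filter_cons]
    cases hq : q a
    · cases hp : p a <;> simp <;> omega
    · rw [h a hq]
      simpa using ih

theorem pvFilter_len_lt {α : Type} (p q : α → Bool)
    (h : ∀ a, q a = true → p a = true) (v : α) (hp : p v = true) (hq : q v = false) :
    ∀ l : List α, v ∈ l → (l.filter q).length < (l.filter p).length := by
  intro l
  induction l with
  | nil => simp
  | cons a l ih =>
    intro hm
    rcases List.mem_cons.mp hm with rfl | hm
    · have hle := pvFilter_len_le p q h l
      simp only [List.filter_cons, hp, hq]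
      simp
      omega
    · have hlt := ih hm
      simp only [List.filter_cons]
      cases hqa : q a
      · cases hpa : p a <;> simp <;> omega
      · rw [h a hqa]
        simpa using hlt

theorem pvUnseen_add_lt (T : List (String × List String)) (seen : PySem.Set String)
    (v : String) (hk : v ∈ T.map Prod.fst) (hv : seen.contains v = false) :
    pvUnseen T (seen.add v) < pvUnseen T seen := by
  unfold pvUnseen
  have hv' : v ∉ seen := fun hm => by
    rw [(PySem.Set.contains_iff seen v).mpr hm] at hv
    exact absurd hv (by simp)
  apply pvFilter_len_lt (v := v) _ _ _ _ _ _ hk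
  · intro a ha
    rw [pvContains_add] at ha
    cases hc : seen.contains a <;> simp_all
  · simp [hv']
  · simp [PySem.Set.mem_add]

theorem pvChilds_of_not_mem (T : List (String × List String)) (v : String)
    (hk : v ∉ T.map Prod.fst) : pvChilds T v = [] := by
  unfold pvChilds
  have : (PySem.Dict.mk T).get? v = none := by
    rw [PySem.Dict.get?_eq_none_iff_not_mem_keys]
    simpa using hk
  rw [PySem.Dict.getD_eq_get?_getD, this]
  rfl

theorem pvUnseen_add_eq_of_not_mem (T : List (String × List String))
    (seen : PySem.Set String) (v : String) (hk : v ∉ T.map Prod.fst) :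
    pvUnseen T (seen.add v) = pvUnseen T seen := by
  unfold pvUnseen
  congr 1
  apply List.filter_congr
  intro k hkmem
  rw [pvContains_add]
  have : (k == v) = false := by
    simp only [beq_eq_false_iff_ne]
    rintro rfl; exact hk hkmem
  simp [this]

-- ===== PORT A =====
-- A's while loop over the explicit stack; the stack is held top-first (Python's
-- stack.pop() takes the last-extended element, so extend(T[v]) prepends T[v] reversed).
def pvRunA (T : List (String × List String)) :
    List String → PySem.Set String → List String → List String
  | [], _, acc => acc
  | v :: st, seen, acc =>
    if seen.contains v then pvRunA T st seen acc
    else pvRunA T ((pvChilds T v).reverse ++ st) (seen.add v) (acc ++ pvEmit v)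
termination_by st seen _ => (pvUnseen T seen, st.length)
decreasing_by
  · exact Prod.Lex.right _ (Nat.lt_succ_self _)
  · rename_i hv
    by_cases hk : v ∈ T.map Prod.fst
    · exact Prod.Lex.left _ _ (pvUnseen_add_lt T seen v hk (by simpa using hv))
    · rw [pvUnseen_add_eq_of_not_mem T seen v hk]
      apply Prod.Lex.right
      simp [pvChilds_of_not_mem T v hk]

def leafs_of (T : List (String × List String)) (s : String) (x : String) : List String :=
  pvRunA T [s] (PySem.Set.ofList [x]) []

-- ===== PORT B =====
-- B's recursive visitor and its for-loop over reversed(T[v]); the fuel argument is a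
-- totality guard only (recursion depth is at most the number of keys plus one, so the
-- fuel T.length + 1 supplied below is never exhausted).
mutual
def pvVisit (T : List (String × List String)) :
    Nat → String → PySem.Set String → List String → PySem.Set String × List String
  | 0, _, seen, acc => (seen, acc)
  | n + 1, v, seen, acc =>
    if seen.contains v then (seen, acc)
    else pvVisitList T n ((pvChilds T v).reverse) (seen.add v) (acc ++ pvEmit v)

def pvVisitList (T : List (String × List String)) :
    Nat → List String → PySem.Set String → List String → PySem.Set String × List String
  | _, [], seen, acc => (seen, acc)
  | n, w :: ws, seen, acc =>
    let p := pvVisit T n w seen acc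
    pvVisitList T n ws p.1 p.2
end

def leafs_of_alt (T : List (String × List String)) (s : String) (x : String) : List String :=
  (pvVisit T (T.length + 1) s (PySem.Set.ofList [x]) []).2

-- ===== PRECONDITION & SPEC =====
-- pvReach computes a property of the INPUT graph alone: the set of nodes reachable from
-- s along child edges while avoiding x (standard breadth-first closure; T.length growth
-- steps reach the fixpoint, the +1 is slack). It is independent of either port's
-- traversal order, seen-set discipline and output, and is used only to state Pre_.
def pvGrow (T : List (String × List String)) (x : String) (R : List String) : List String :=
  PySem.List.dedup (R ++ R.flatMap (fun v => (pvChilds T v).filter (fun c => decide (c ≠ x))))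

def pvReachAux (T : List (String × List String)) (x : String) :
    Nat → List String → List String
  | 0, R => R
  | n + 1, R => pvReachAux T x n (pvGrow T x R)

def pvReach (T : List (String × List String)) (s x : String) : List String :=
  pvReachAux T x (T.length + 1) (if s = x then [] else [s])

-- Pre_ excludes exactly the inputs on which A raises KeyError: some node reachable
-- from s along child edges while avoiding x is not a key of T (B raises there too).
def Pre_leafs_of (T : List (String × List String)) (s : String) (x : String) : Prop :=
  ∀ v ∈ pvReach T s x, v ∈ T.map Prod.fst
instance (T : List (String × List String)) (s : String) (x : String) : Decidable (Pre_leafs_of T s x) := by unfold Pre_leafs_of; infer_instance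

def pvWitness_leafs_of : (List (String × List String)) × String × String :=
  ([("ab", ["c"]), ("c", [])], "ab", "q")

def Spec_leafs_of (T : List (String × List String)) (s : String) (x : String) (out : List String) : Prop := out = leafs_of_alt T s x
instance (T : List (String × List String)) (s : String) (x : String) (out : List String) : Decidable (Spec_leafs_of T s x out) := by unfold Spec_leafs_of; infer_instance

-- ===== CLAIM (what is proved, stated in full; the proofs are below) =====
def Claim_equal_leafs_of : Prop := ∀ (T : List (String × List String)) (s : String) (x : String), Dom_leafs_of T s x → Pre_leafs_of T s x → Spec_leafs_of T s x (leafs_of T s x)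

-- ===== LEMMAS AND PROOFS =====

theorem pvUnseen_add_le (T : List (String × List String)) (seen : PySem.Set String)
    (v : String) : pvUnseen T (seen.add v) ≤ pvUnseen T seen := by
  unfold pvUnseen
  apply pvFilter_len_le
  intro a ha
  rw [pvContains_add] at ha
  cases hc : seen.contains a <;> simp_all

theorem pvRunA_nil (T : List (String × List String)) (seen : PySem.Set String)
    (acc : List String) : pvRunA T [] seen acc = acc := by
  rw [pvRunA]

theorem pvRunA_cons (T : List (String × List String)) (v : String) (st : List String)
    (seen : PySem.Set String) (acc : List String) :
    pvRunA T (v :: st) seen acc =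
      if seen.contains v then pvRunA T st seen acc
      else pvRunA T ((pvChilds T v).reverse ++ st) (seen.add v) (acc ++ pvEmit v) := by
  rw [pvRunA]

-- seen only grows through the visitor, so the unseen count never increases
theorem pvSeenBound (T : List (String × List String)) :
    ∀ n : Nat,
      (∀ v seen acc, pvUnseen T (pvVisit T n v seen acc).1 ≤ pvUnseen T seen) ∧
      (∀ ws seen acc, pvUnseen T (pvVisitList T n ws seen acc).1 ≤ pvUnseen T seen) := by
  intro n
  induction n with
  | zero =>
    have hv : ∀ v seen acc, pvUnseen T (pvVisit T 0 v seen acc).1 ≤ pvUnseen T seen := by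
      intro v seen acc; rw [pvVisit]
    refine ⟨hv, ?_⟩
    intro ws
    induction ws with
    | nil => intro seen acc; rw [pvVisitList]
    | cons w ws ih =>
      intro seen acc
      rw [pvVisitList]
      exact le_trans (ih _ _) (hv _ _ _)
  | succ m ih =>
    have hv : ∀ v seen acc, pvUnseen T (pvVisit T (m + 1) v seen acc).1 ≤ pvUnseen T seen := by
      intro v seen acc
      rw [pvVisit]
      split
      · exact le_refl _
      · exact le_trans (ih.2 _ _ _) (pvUnseen_add_le T seen v)
    refine ⟨hv, ?_⟩
    intro ws
    induction ws with
    | nil => intro seen acc; rw [pvVisitList]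
    | cons w ws ih2 =>
      intro seen acc
      rw [pvVisitList]
      exact le_trans (ih2 _ _) (hv _ _ _)

-- the bridge: running A's loop on a worklist equals visiting the worklist recursively
theorem pvBridge (T : List (String × List String)) :
    ∀ n : Nat,
      (∀ v rest seen acc, pvUnseen T seen < n →
        pvRunA T (v :: rest) seen acc =
          pvRunA T rest (pvVisit T n v seen acc).1 (pvVisit T n v seen acc).2) ∧
      (∀ ws rest seen acc, pvUnseen T seen < n →
        pvRunA T (ws ++ rest) seen acc =
          pvRunA T rest (pvVisitList T n ws seen acc).1 (pvVisitList T n ws seen acc).2) := by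
  intro n
  induction n with
  | zero => exact ⟨fun _ _ _ _ h => absurd h (Nat.not_lt_zero _), fun _ _ _ _ h => absurd h (Nat.not_lt_zero _)⟩
  | succ m ih =>
    have hv : ∀ v rest seen acc, pvUnseen T seen < m + 1 →
        pvRunA T (v :: rest) seen acc =
          pvRunA T rest (pvVisit T (m + 1) v seen acc).1 (pvVisit T (m + 1) v seen acc).2 := by
      intro v rest seen acc h
      rw [pvVisit, pvRunA_cons]
      by_cases hm : v ∈ seen
      · simp [hm]
      · have hc' : seen.contains v = false := by
          cases hcc : seen.contains v
          · rfl
          · exact absurd ((PySem.Set.contains_iff seen v).mp hcc) hm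
        simp only [hc', Bool.false_eq_true, if_false]
        by_cases hk : v ∈ T.map Prod.fst
        · have hlt : pvUnseen T (seen.add v) < m :=
            Nat.lt_of_lt_of_le (pvUnseen_add_lt T seen v hk hc') (Nat.lt_succ_iff.mp h)
          exact ih.2 _ _ _ _ hlt
        · rw [pvChilds_of_not_mem T v hk]
          simp [pvVisitList]
    refine ⟨hv, ?_⟩
    intro ws
    induction ws with
    | nil =>
      intro rest seen acc _
      rw [pvVisitList]
      simp
    | cons w ws ih2 =>
      intro rest seen acc h
      rw [pvVisitList]
      have h1 := hv w (ws ++ rest) seen acc h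
      rw [List.cons_append, h1]
      exact ih2 _ _ _ (Nat.lt_of_le_of_lt ((pvSeenBound T (m + 1)).1 w seen acc) h)

theorem pvUnseen_le_len (T : List (String × List String)) (seen : PySem.Set String) :
    pvUnseen T seen ≤ T.length := by
  unfold pvUnseen
  calc ((T.map Prod.fst).filter _).length ≤ (T.map Prod.fst).length := List.length_filter_le _ _
    _ = T.length := List.length_map ..

-- ===== VERDICT (by name: the statement is the Claim_ definition above) =====
theorem leafs_of_spec : Claim_equal_leafs_of := by
  intro T s x _ _
  unfold Spec_leafs_of leafs_of leafs_of_alt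
  have h : pvUnseen T (PySem.Set.ofList [x]) < T.length + 1 :=
    Nat.lt_succ_of_le (pvUnseen_le_len T _)
  have := (pvBridge T (T.length + 1)).1 s [] (PySem.Set.ofList [x]) [] h
  rw [this, pvRunA_nil]
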